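-- pv_equiv track=rewrite | github.com/laurentbeaughon/aoc2022 | src/day_22.py | prepare_map
-- ===== SOURCE A (Python) =====
-- def prepare_map(map):
--     row_inner_wall = [
--         [i for i in range(len(map[j])) if map[j][i] == 1]
--         for j in range(len(map))
--     ]
--     column_inner_wall = [
--         [j for j in range(len(map)) if map[j][i] == 1]
--         for i in range(len(map[0]))
--     ]
--     column_tunnel = []
--     row_tunnel = []
--     for i in range(len(map)):
--         start = 0
--         j = 0
--         while map[i][j] == -1:
--             start += 1
--             j += 1
--         while j < len(map[i]) and map[i][j] != -1:
--             j += 1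
--         end = j
--         row_tunnel.append((start, end))
--     for j in range(len(map[0])):
--         start = 0
--         i = 0
--         while map[i][j] == -1:
--             start += 1
--             i += 1
--         while i < len(map) and map[i][j] != -1:
--             i += 1
--         end = i
--         column_tunnel.append((start, end))
--
--     prepared_map = {
--         "column_walls": column_inner_wall,
--         "row_walls": row_inner_wall,
--         "column_tunnel": column_tunnel,
--         "row_tunnel": row_tunnel,
--     }
--     return prepared_map
-- ===== SOURCE B (Python) =====
-- def _step(st, pos, v):
--     # st = [phase, start, end]; phase 0: counting leading -1s, 1: inside the
--     # open run, 2: run closed.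
--     if st[0] == 0:
--         if v == -1:
--             st[1] += 1
--         else:
--             st[0] = 1
--             st[2] = pos + 1
--     elif st[0] == 1:
--         if v == -1:
--             st[0] = 2
--         else:
--             st[2] = pos + 1
--
--
-- def _finish(st):
--     return (st[1], st[1]) if st[0] == 0 else (st[1], st[2])
--
--
-- def prepare_map(map):
--     h = len(map)
--     w = len(map[0])
--     row_walls = [[] for _ in range(h)]
--     col_walls = [[] for _ in range(w)]
--     row_st = [[0, 0, 0] for _ in range(h)]
--     col_st = [[0, 0, 0] for _ in range(w)]
--     for i, row in enumerate(map):
--         for j, v in enumerate(row):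
--             if v == 1:
--                 row_walls[i].append(j)
--                 if j < w:
--                     col_walls[j].append(i)
--             _step(row_st[i], j, v)
--             if j < w:
--                 _step(col_st[j], i, v)
--     return {
--         "column_walls": col_walls,
--         "row_walls": row_walls,
--         "column_tunnel": [_finish(st) for st in col_st],
--         "row_tunnel": [_finish(st) for st in row_st],
--     }
-- ===== Notes on version B (the rewrite author's own statement) =====
-- stated objective: alternative
-- what changed: Replaced A's four staged scans (two index-comprehension passes for walls plus two while-loop passes for tunnels, each re-reading the grid) by ONE nested pass over the cells that fills row/column wall lists in place and drives a 3-phase state machine [phase,start,end] per row and per column, from which the tunnel bounds are read off at the end.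
import Mathlib
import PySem

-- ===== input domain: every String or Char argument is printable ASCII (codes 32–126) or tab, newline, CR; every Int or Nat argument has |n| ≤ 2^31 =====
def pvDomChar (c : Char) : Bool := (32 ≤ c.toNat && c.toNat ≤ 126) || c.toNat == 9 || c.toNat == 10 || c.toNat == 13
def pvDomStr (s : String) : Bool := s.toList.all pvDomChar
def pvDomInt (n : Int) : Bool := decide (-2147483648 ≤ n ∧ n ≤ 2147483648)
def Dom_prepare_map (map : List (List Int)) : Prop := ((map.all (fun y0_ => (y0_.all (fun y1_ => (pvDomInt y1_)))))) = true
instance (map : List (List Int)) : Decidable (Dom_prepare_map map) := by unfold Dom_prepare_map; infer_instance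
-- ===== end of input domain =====

-- B replaces A's four staged scans (two index comprehensions for walls, two while-loop passes for
-- tunnels) by ONE nested pass over the cells filling both wall tables and driving a 3-phase
-- state machine per row and per column from which the tunnel bounds are read off; objective:
-- alternative (same asymptotic cost).


-- ===== PORT A =====
-- [i for i in range(len(r)) if r[i] == 1]  (one row j of A's row_inner_wall comprehension)
def pvAWallsRow (r : List Int) : List Int :=
  ((List.range r.length).filter (fun i => r.getD i 0 == 1)).map (fun i : Nat => (i : Int))

-- A's first while loop of the row pass: start/j advance together, so only j is tracked.
-- fuel makes the recursion total; inside Pre_ the loop stops before the fuel runs out.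
def pvAFindStartRow (r : List Int) : Nat → Nat → Nat
  | 0, j => j
  | fuel+1, j => if r.getD j 0 = -1 then pvAFindStartRow r fuel (j+1) else j

-- A's second while loop of the row pass
def pvAFindEndRow (r : List Int) : Nat → Nat → Nat
  | 0, j => j
  | fuel+1, j => if j < r.length ∧ r.getD j 0 ≠ -1 then pvAFindEndRow r fuel (j+1) else j

-- one row of A's row_tunnel loop; the Python tuple (start, end) is the 2-element list [start, end]
def pvARowTunnel (r : List Int) : List Int :=
  let s := pvAFindStartRow r r.length 0
  let e := pvAFindEndRow r r.length s
  [(s : Int), (e : Int)]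

-- [j for j in range(len(map)) if map[j][i] == 1]  (one column i of A's column_inner_wall)
def pvAColWalls (m : List (List Int)) (i : Nat) : List Int :=
  ((List.range m.length).filter (fun j => (m.getD j []).getD i 0 == 1)).map (fun j : Nat => (j : Int))

-- A's column-tunnel while loops, indexing map[i][j] directly as the Python does
def pvAFindStartCol (m : List (List Int)) (jcol : Nat) : Nat → Nat → Nat
  | 0, i => i
  | fuel+1, i => if (m.getD i []).getD jcol 0 = -1 then pvAFindStartCol m jcol fuel (i+1) else i

def pvAFindEndCol (m : List (List Int)) (jcol : Nat) : Nat → Nat → Nat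
  | 0, i => i
  | fuel+1, i => if i < m.length ∧ (m.getD i []).getD jcol 0 ≠ -1 then pvAFindEndCol m jcol fuel (i+1) else i

def pvAColTunnel (m : List (List Int)) (jcol : Nat) : List Int :=
  let s := pvAFindStartCol m jcol m.length 0
  let e := pvAFindEndCol m jcol m.length s
  [(s : Int), (e : Int)]

def prepare_map (map : List (List Int)) : List (String × List (List Int)) :=
  let row_inner_wall := (List.range map.length).map (fun j => pvAWallsRow (map.getD j []))
  let column_inner_wall := (List.range (map.getD 0 []).length).map (fun i => pvAColWalls map i)
  let row_tunnel := (List.range map.length).map (fun i => pvARowTunnel (map.getD i []))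
  let column_tunnel := (List.range (map.getD 0 []).length).map (fun j => pvAColTunnel map j)
  [("column_walls", column_inner_wall), ("row_walls", row_inner_wall),
   ("column_tunnel", column_tunnel), ("row_tunnel", row_tunnel)]

-- ===== PORT B =====
-- _step: Python mutates the 3-list st = [phase, start, end] in place; ported as a triple-valued function
def pvStep (st : Int × Int × Int) (pos : Int) (v : Int) : Int × Int × Int :=
  if st.1 = 0 then
    if v = -1 then (0, st.2.1 + 1, st.2.2) else (1, st.2.1, pos + 1)
  else if st.1 = 1 then
    if v = -1 then (2, st.2.1, st.2.2) else (st.1, st.2.1, pos + 1)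
  else st

-- _finish; the Python pair becomes the 2-element list
def pvFinish (st : Int × Int × Int) : List Int :=
  if st.1 = 0 then [st.2.1, st.2.1] else [st.2.1, st.2.2]

-- xs[n] = f(xs[n]) — B's in-place update of one slot of a wall/state table
def pvModify {α : Type} : List α → Nat → (α → α) → List α
  | [], _, _ => []
  | x :: xs, 0, f => f x :: xs
  | x :: xs, n+1, f => x :: pvModify xs n f

-- the four updates of B's inner loop body (i, j are list indices, hence ≥ 0: .toNat is exact)
-- if v == 1: row_walls[i].append(j)
def pvCRW (i : Int) (rw : List (List Int)) (jv : Int × Int) : List (List Int) :=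
  if jv.2 = 1 then pvModify rw i.toNat (fun l => l ++ [jv.1]) else rw
-- if v == 1 and j < w: col_walls[j].append(i)
def pvCCW (w : Nat) (i : Int) (cw : List (List Int)) (jv : Int × Int) : List (List Int) :=
  if jv.2 = 1 ∧ jv.1 < (w : Int) then pvModify cw jv.1.toNat (fun l => l ++ [i]) else cw
-- _step(row_st[i], j, v)
def pvCRS (i : Int) (rst : List (Int × Int × Int)) (jv : Int × Int) : List (Int × Int × Int) :=
  pvModify rst i.toNat (fun s => pvStep s jv.1 jv.2)
-- if j < w: _step(col_st[j], i, v)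
def pvCCS (w : Nat) (i : Int) (cst : List (Int × Int × Int)) (jv : Int × Int) : List (Int × Int × Int) :=
  if jv.1 < (w : Int) then pvModify cst jv.1.toNat (fun s => pvStep s i jv.2) else cst

-- body of 'for j, v in enumerate(row)': the four tables updated in one step
def pvCell (w : Nat) (i : Int)
    (st : List (List Int) × List (List Int) × List (Int × Int × Int) × List (Int × Int × Int))
    (jv : Int × Int) :
    List (List Int) × List (List Int) × List (Int × Int × Int) × List (Int × Int × Int) :=
  (pvCRW i st.1 jv, pvCCW w i st.2.1 jv, pvCRS i st.2.2.1 jv, pvCCS w i st.2.2.2 jv)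

def prepare_map_alt (map : List (List Int)) : List (String × List (List Int)) :=
  let h := map.length
  let w := (map.getD 0 []).length
  let init := (List.replicate h ([] : List Int), List.replicate w ([] : List Int),
               List.replicate h ((0, 0, 0) : Int × Int × Int),
               List.replicate w ((0, 0, 0) : Int × Int × Int))
  let fin := (PySem.List.enumerate map 0).foldl
      (fun st irow => (PySem.List.enumerate irow.2 0).foldl (pvCell w irow.1) st) init
  [("column_walls", fin.2.1), ("row_walls", fin.1),
   ("column_tunnel", fin.2.2.2.map pvFinish), ("row_tunnel", fin.2.2.1.map pvFinish)]

-- ===== PRECONDITION & SPEC =====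
-- Pre_ excludes exactly the inputs on which A raises: an empty map or an empty first row
-- (IndexError on map[0] / map[i][0]), a row shorter than row 0 (IndexError in the column
-- comprehension), and a row or column consisting entirely of -1 (the first while loop runs
-- past the end: IndexError).
def Pre_prepare_map (map : List (List Int)) : Prop :=
  map ≠ [] ∧ 0 < (map.getD 0 []).length ∧
  (∀ r ∈ map, (map.getD 0 []).length ≤ r.length) ∧
  (∀ r ∈ map, ∃ x ∈ r, x ≠ -1) ∧
  (∀ j < (map.getD 0 []).length, ∃ r ∈ map, r.getD j 0 ≠ -1)
instance (map : List (List Int)) : Decidable (Pre_prepare_map map) := by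
  unfold Pre_prepare_map; infer_instance

def pvWitness_prepare_map : List (List Int) := [[0]]

def Spec_prepare_map (map : List (List Int)) (out : List (String × List (List Int))) : Prop := out = prepare_map_alt map
instance (map : List (List Int)) (out : List (String × List (List Int))) : Decidable (Spec_prepare_map map out) := by unfold Spec_prepare_map; infer_instance

-- ===== CLAIM (what is proved, stated in full; the proofs are below) =====
def Claim_equal_prepare_map : Prop := ∀ (map : List (List Int)), Dom_prepare_map map → Pre_prepare_map map → Spec_prepare_map map (prepare_map map)

-- ===== LEMMAS AND PROOFS =====

-- proof-side characterizations of what one sequence (a row, or a column read top-down) yields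
def pvSeqWalls (r : List Int) : List Int :=
  (PySem.List.enumerate r 0).filterMap (fun kv => if kv.2 == 1 then some kv.1 else none)

def pvSeqTunnel (r : List Int) : List Int :=
  let start := r.findIdx (fun v => !(v == -1))
  let rest := r.drop start
  let len := rest.findIdx (fun v => v == -1)
  [(start : Int), ((start + len : Nat) : Int)]

def pvRun (r : List Int) (p : Int) (st : Int × Int × Int) : Int × Int × Int :=
  (PySem.List.enumerate r p).foldl (fun s jv => pvStep s jv.1 jv.2) st

-- ---- pvModify toolkit ----
lemma pvModify_id {α : Type} : ∀ (l : List α) (n : Nat), pvModify l n (fun x => x) = l := by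
  intro l; induction l with
  | nil => intro n; rfl
  | cons x xs ih => intro n; cases n with
    | zero => rfl
    | succ n => simp [pvModify, ih]

lemma pvModify_comp {α : Type} : ∀ (l : List α) (n : Nat) (f g : α → α),
    pvModify (pvModify l n f) n g = pvModify l n (fun x => g (f x)) := by
  intro l; induction l with
  | nil => intro n f g; rfl
  | cons x xs ih => intro n f g; cases n with
    | zero => rfl
    | succ n => simp [pvModify, ih]

lemma pvModify_append {α : Type} : ∀ (done : List α) (x : α) (rest : List α) (f : α → α),
    pvModify (done ++ x :: rest) done.length f = done ++ f x :: rest := by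
  intro done; induction done with
  | nil => intro x rest f; rfl
  | cons y d ih => intro x rest f; simp [pvModify, ih]

-- ---- splitting the fold of the 4-tuple body into component folds ----
lemma pv_split_cell (w : Nat) (i : Int) : ∀ (l : List (Int × Int)) (a b : List (List Int))
    (c d : List (Int × Int × Int)),
    l.foldl (pvCell w i) (a, b, c, d)
      = (l.foldl (pvCRW i) a, l.foldl (pvCCW w i) b, l.foldl (pvCRS i) c, l.foldl (pvCCS w i) d) := by
  intro l; induction l with
  | nil => intro a b c d; rfl
  | cons jv l ih => intro a b c d; simpa [pvCell] using ih _ _ _ _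

lemma pv_split_outer (w : Nat) : ∀ (l : List (Int × List Int)) (a b : List (List Int))
    (c d : List (Int × Int × Int)),
    l.foldl (fun st irow => (PySem.List.enumerate irow.2 0).foldl (pvCell w irow.1) st) (a, b, c, d)
      = (l.foldl (fun x irow => (PySem.List.enumerate irow.2 0).foldl (pvCRW irow.1) x) a,
         l.foldl (fun x irow => (PySem.List.enumerate irow.2 0).foldl (pvCCW w irow.1) x) b,
         l.foldl (fun x irow => (PySem.List.enumerate irow.2 0).foldl (pvCRS irow.1) x) c,
         l.foldl (fun x irow => (PySem.List.enumerate irow.2 0).foldl (pvCCS w irow.1) x) d) := by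
  intro l; induction l with
  | nil => intro a b c d; rfl
  | cons irow l ih => intro a b c d; simpa [pv_split_cell] using ih _ _ _ _

-- ---- walls: an append-accumulating fold is a filterMap ----
lemma pv_walls_fold : ∀ (xs : List Int) (p : Int) (acc : List Int),
    (PySem.List.enumerate xs p).foldl (fun a jv => if jv.2 = 1 then a ++ [jv.1] else a) acc
      = acc ++ (PySem.List.enumerate xs p).filterMap (fun kv => if kv.2 == 1 then some kv.1 else none) := by
  intro xs; induction xs with
  | nil => intro p acc; simp [PySem.List.enumerate]
  | cons v xs ih =>
    intro p acc
    rw [PySem.List.enumerate_cons]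
    simp only [List.foldl_cons, List.filterMap_cons]
    by_cases hv : v = 1
    · simp [hv, ih]
    · simp [hv, ih]

-- ---- a fold that always modifies the same slot n is one modification of slot n ----
lemma pv_fold_fixed {α γ : Type} (n : Nat) (g : α → γ → α) : ∀ (l : List γ) (xs : List α),
    l.foldl (fun acc y => pvModify acc n (fun a => g a y)) xs = pvModify xs n (fun a => l.foldl g a) := by
  intro l; induction l with
  | nil => intro xs; simp [pvModify_id]
  | cons y l ih => intro xs; simp [List.foldl_cons, ih, pvModify_comp]

-- ---- outer loop for the row tables: row i only touches slot i ----
lemma pv_outer_modify {α β : Type} (f : β → α → α) : ∀ (ms : List β) (done rest : List α),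
    rest.length = ms.length →
    (PySem.List.enumerate ms ((done.length : Nat) : Int)).foldl
        (fun acc ix => pvModify acc ix.1.toNat (f ix.2)) (done ++ rest)
      = done ++ List.zipWith f ms rest := by
  intro ms; induction ms with
  | nil =>
    intro done rest h
    have hr : rest = [] := List.eq_nil_of_length_eq_zero (by simpa using h)
    simp [hr, PySem.List.enumerate]
  | cons x ms ih =>
    intro done rest h
    cases rest with
    | nil => simp at h
    | cons r rest =>
      rw [PySem.List.enumerate_cons]
      simp only [List.foldl_cons, List.zipWith_cons_cons, Int.toNat_natCast]
      rw [pvModify_append]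
      have hlen : ((done.length : Int) + 1) = (((done ++ [f x r]).length : Nat) : Int) := by
        simp
      rw [List.append_cons done (f x r) rest, hlen, ih (done ++ [f x r]) rest (by simpa using h)]
      simp

lemma pv_zip_replicate {α β : Type} (f : β → α → α) : ∀ (l : List β) (c : α),
    List.zipWith f l (List.replicate l.length c) = l.map (fun x => f x c) := by
  intro l; induction l with
  | nil => intro c; rfl
  | cons x l ih => intro c; simp [List.replicate_succ, ih]

lemma pv_outer_modify0 {α β : Type} (f : β → α → α) (ms : List β) (rest : List α)
    (h : rest.length = ms.length) :
    (PySem.List.enumerate ms 0).foldl (fun acc ix => pvModify acc ix.1.toNat (f ix.2)) rest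
      = List.zipWith f ms rest := by
  have := pv_outer_modify f ms [] rest h
  simpa using this

-- ---- inner loop for the column tables: positions ≥ w are skipped ----
lemma pv_noop (w : Nat) {γ : Type} (G : γ → Int → γ) : ∀ (row : List Int) (p : Int) (c : List γ),
    (w : Int) ≤ p →
    (PySem.List.enumerate row p).foldl
        (fun c jv => if jv.1 < (w : Int) then pvModify c jv.1.toNat (fun x => G x jv.2) else c) c = c := by
  intro row; induction row with
  | nil => intro p c _; simp [PySem.List.enumerate]
  | cons v row ih =>
    intro p c hp
    rw [PySem.List.enumerate_cons]
    simp only [List.foldl_cons]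
    rw [if_neg (by omega)]
    exact ih (p + 1) c (by omega)

lemma pv_fold_zip (w : Nat) {γ : Type} (G : γ → Int → γ) : ∀ (row : List Int) (done rest : List γ),
    done.length + rest.length = w → rest.length ≤ row.length →
    (PySem.List.enumerate row ((done.length : Nat) : Int)).foldl
        (fun c jv => if jv.1 < (w : Int) then pvModify c jv.1.toNat (fun x => G x jv.2) else c)
        (done ++ rest)
      = done ++ List.zipWith G rest row := by
  intro row; induction row with
  | nil =>
    intro done rest h hle
    have hr : rest = [] := by
      cases rest with
      | nil => rfl
      | cons a t => simp at hle
    simp [hr, PySem.List.enumerate]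
  | cons v row ih =>
    intro done rest h hle
    cases rest with
    | nil =>
      rw [PySem.List.enumerate_cons]
      simp only [List.foldl_cons, List.append_nil, List.zipWith_nil_left]
      have hdw : done.length = w := by simpa using h
      rw [if_neg (by omega)]
      rw [pv_noop w G row ((done.length : Int) + 1) done (by omega)]
    | cons c rest =>
      rw [PySem.List.enumerate_cons]
      simp only [List.foldl_cons, List.zipWith_cons_cons]
      rw [if_pos (by simp at h ⊢; omega), Int.toNat_natCast, pvModify_append]
      have hlen : ((done.length : Int) + 1) = (((done ++ [G c v]).length : Nat) : Int) := by simp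
      rw [List.append_cons done (G c v) rest, hlen,
        ih (done ++ [G c v]) rest (by simp at h ⊢; omega) (by simpa using hle)]
      simp

lemma pv_zip_range {γ : Type} (G : γ → Int → γ) (cs : List γ) (row : List Int) (d : γ) (w : Nat)
    (h1 : cs.length = w) (h2 : w ≤ row.length) :
    List.zipWith G cs row = (List.range w).map (fun j => G (cs.getD j d) (row.getD j 0)) := by
  apply List.ext_getElem (by simp [h1]; omega)
  intro j hj hj'
  simp only [List.getElem_zipWith, List.getElem_map, List.getElem_range]
  have hjw : j < w := by simpa using hj'
  rw [List.getD_eq_getElem cs d (by omega), List.getD_eq_getElem row 0 (by omega)]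

-- ---- outer loop for the column tables ----
lemma pv_outer_col (w : Nat) {γ : Type} (G : Int → γ → Int → γ) : ∀ (ms : List (List Int)) (p : Nat)
    (cs : List γ) (d : γ), cs.length = w → (∀ r ∈ ms, w ≤ r.length) →
    (PySem.List.enumerate ms ((p : Nat) : Int)).foldl
        (fun c irow => (PySem.List.enumerate irow.2 0).foldl
          (fun c jv => if jv.1 < (w : Int) then pvModify c jv.1.toNat (fun x => G irow.1 x jv.2) else c) c) cs
      = (List.range w).map (fun j =>
          (PySem.List.enumerate ms ((p : Nat) : Int)).foldl
            (fun s irow => G irow.1 s (irow.2.getD j 0)) (cs.getD j d)) := by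
  intro ms; induction ms with
  | nil =>
    intro p cs d h1 _
    simp only [PySem.List.enumerate, List.foldl_nil]
    apply List.ext_getElem (by simp [h1])
    intro j hj hj'
    simp only [List.getElem_map, List.getElem_range]
    rw [List.getD_eq_getElem cs d (by omega)]
  | cons row ms ih =>
    intro p cs d h1 h2
    rw [PySem.List.enumerate_cons]
    simp only [List.foldl_cons]
    have hinner := pv_fold_zip w (G ((p : Nat) : Int)) row [] cs (by simpa using h1)
      (by rw [h1]; exact h2 row (by simp))
    simp only [List.length_nil, Nat.cast_zero, List.nil_append] at hinner
    rw [hinner, pv_zip_range (G ((p : Nat) : Int)) cs row d w h1 (h2 row (by simp))]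
    have hc : ((p : Int) + 1) = (((p + 1 : Nat) : Nat) : Int) := by push_cast; ring
    rw [hc, ih (p + 1) _ d (by simp) (fun r hr => h2 r (by simp [hr]))]
    apply List.map_congr_left
    intro j hj
    have hjw : j < w := List.mem_range.mp hj
    congr 1
    rw [List.getD_eq_getElem _ d (by simpa using hjw)]
    simp

lemma pv_outer_col0 (w : Nat) {γ : Type} (G : Int → γ → Int → γ) (ms : List (List Int))
    (cs : List γ) (d : γ) (h1 : cs.length = w) (h2 : ∀ r ∈ ms, w ≤ r.length) :
    (PySem.List.enumerate ms 0).foldl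
        (fun c irow => (PySem.List.enumerate irow.2 0).foldl
          (fun c jv => if jv.1 < (w : Int) then pvModify c jv.1.toNat (fun x => G irow.1 x jv.2) else c) c) cs
      = (List.range w).map (fun j =>
          (PySem.List.enumerate ms 0).foldl
            (fun s irow => G irow.1 s (irow.2.getD j 0)) (cs.getD j d)) := by
  have := pv_outer_col w G ms 0 cs d h1 h2
  simpa using this

lemma pv_enum_map {α β : Type} (f : α → β) : ∀ (ms : List α) (p : Int),
    PySem.List.enumerate (ms.map f) p = (PySem.List.enumerate ms p).map (fun ix => (ix.1, f ix.2)) := by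
  intro ms; induction ms with
  | nil => intro p; rfl
  | cons x ms ih => intro p; rw [List.map_cons, PySem.List.enumerate_cons, PySem.List.enumerate_cons, ih]; rfl

-- a fold over rows reading only column j is the run over the extracted column
lemma pv_fold_col {γ : Type} (G : Int → γ → Int → γ) (ms : List (List Int)) (p : Int) (j : Nat) (s0 : γ) :
    (PySem.List.enumerate ms p).foldl (fun s irow => G irow.1 s (irow.2.getD j 0)) s0
      = (PySem.List.enumerate (ms.map (fun r => r.getD j 0)) p).foldl (fun s iv => G iv.1 s iv.2) s0 := by
  rw [pv_enum_map, List.foldl_map]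

-- ---- the per-row result lemmas ----
lemma pv_row_rw (i : Int) (row : List Int) (a : List (List Int)) :
    (PySem.List.enumerate row 0).foldl (pvCRW i) a = pvModify a i.toNat (fun l => l ++ pvSeqWalls row) := by
  have hb : pvCRW i = fun (a : List (List Int)) (jv : Int × Int) =>
      pvModify a i.toNat (fun l => if jv.2 = 1 then l ++ [jv.1] else l) := by
    funext a jv
    by_cases hv : jv.2 = 1 <;> simp [pvCRW, hv, pvModify_id]
  rw [hb]
  have h1 := pv_fold_fixed i.toNat
    (fun (l : List Int) (jv : Int × Int) => if jv.2 = 1 then l ++ [jv.1] else l)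
    (PySem.List.enumerate row 0) a
  beta_reduce at h1
  rw [h1]
  congr 1
  funext l
  rw [pv_walls_fold row 0 l, pvSeqWalls]

lemma pv_row_rst (i : Int) (row : List Int) (c : List (Int × Int × Int)) :
    (PySem.List.enumerate row 0).foldl (pvCRS i) c = pvModify c i.toNat (fun s => pvRun row 0 s) := by
  have h1 := pv_fold_fixed i.toNat
    (fun (s : Int × Int × Int) (jv : Int × Int) => pvStep s jv.1 jv.2)
    (PySem.List.enumerate row 0) c
  beta_reduce at h1
  exact h1

-- pvCCW in the uniform column-body shape
lemma pv_ccw_eq (w : Nat) (i : Int) : pvCCW w i = fun (c : List (List Int)) (jv : Int × Int) =>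
    if jv.1 < (w : Int) then pvModify c jv.1.toNat (fun x => if jv.2 = 1 then x ++ [i] else x) else c := by
  funext c jv
  by_cases hv : jv.2 = 1 <;> by_cases hj : jv.1 < (w : Int) <;>
    simp [pvCCW, hv, hj, pvModify_id]

lemma pv_ccs_eq (w : Nat) (i : Int) : pvCCS w i = fun (c : List (Int × Int × Int)) (jv : Int × Int) =>
    if jv.1 < (w : Int) then pvModify c jv.1.toNat (fun x => pvStep x i jv.2) else c := rfl

-- ---- the state machine computes pvSeqTunnel ----
lemma pv_run_two : ∀ (r : List Int) (p : Int) (s e : Int), pvRun r p (2, s, e) = (2, s, e) := by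
  intro r; induction r with
  | nil => intro p s e; rfl
  | cons v r ih =>
    intro p s e
    rw [pvRun, PySem.List.enumerate_cons, List.foldl_cons]
    have : pvStep (2, s, e) p v = (2, s, e) := by simp [pvStep]
    rw [this]
    exact ih (p + 1) s e

lemma pv_run_one : ∀ (r : List Int) (p : Int) (s : Int),
    pvFinish (pvRun r p (1, s, p)) = [s, p + ((r.findIdx (fun v => v == -1) : Nat) : Int)] := by
  intro r; induction r with
  | nil => intro p s; simp [pvRun, PySem.List.enumerate, pvFinish]
  | cons v r ih =>
    intro p s
    rw [pvRun, PySem.List.enumerate_cons, List.foldl_cons, List.findIdx_cons]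
    by_cases hv : v = -1
    · have hb : (v == -1) = true := by simp [hv]
      have hst : pvStep (1, s, p) p v = (2, s, p) := by simp [pvStep, hv]
      rw [hb, hst]
      show pvFinish (pvRun r (p + 1) (2, s, p)) = _
      rw [pv_run_two]
      simp [pvFinish]
    · have hb : (v == -1) = false := by simp [hv]
      have hst : pvStep (1, s, p) p v = (1, s, p + 1) := by simp [pvStep, hv]
      rw [hb, hst]
      show pvFinish (pvRun r (p + 1) (1, s, p + 1)) = _
      rw [ih (p + 1) s]
      simp only [cond_false]
      congr 1
      simp only [List.cons.injEq, and_true]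
      push_cast
      ring

lemma pv_run_zero : ∀ (r : List Int) (p s e : Int), (∃ x ∈ r, x ≠ -1) →
    pvFinish (pvRun r p (0, s, e))
      = [s + ((r.findIdx (fun v => !(v == -1)) : Nat) : Int),
         p + ((r.findIdx (fun v => !(v == -1)) : Nat) : Int) + 1
           + (((r.drop (r.findIdx (fun v => !(v == -1)) + 1)).findIdx (fun v => v == -1) : Nat) : Int)] := by
  intro r; induction r with
  | nil => intro p s e h; simp at h
  | cons v r ih =>
    intro p s e h
    rw [pvRun, PySem.List.enumerate_cons, List.foldl_cons, List.findIdx_cons]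
    by_cases hv : v = -1
    · have hb : (!(v == -1)) = false := by simp [hv]
      have hst : pvStep (0, s, e) p v = (0, s + 1, e) := by simp [pvStep, hv]
      rw [hb, hst]
      have hr : ∃ x ∈ r, x ≠ -1 := by
        obtain ⟨x, hx, hne⟩ := h
        rcases List.mem_cons.mp hx with h1 | h1
        · exact absurd (h1 ▸ hv) hne
        · exact ⟨x, h1, hne⟩
      show pvFinish (pvRun r (p + 1) (0, s + 1, e)) = _
      rw [ih (p + 1) (s + 1) e hr]
      simp only [cond_false, List.drop_succ_cons]
      simp only [List.cons.injEq, and_true]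
      exact ⟨by push_cast; ring, by push_cast; ring⟩
    · have hb : (!(v == -1)) = true := by simp [hv]
      have hst : pvStep (0, s, e) p v = (1, s, p + 1) := by simp [pvStep, hv]
      rw [hb, hst]
      show pvFinish (pvRun r (p + 1) (1, s, p + 1)) = _
      rw [pv_run_one r (p + 1) s]
      simp only [cond_true, Nat.cast_zero, List.drop_succ_cons, List.drop_zero]
      simp only [List.cons.injEq, and_true]
      exact ⟨by ring, by ring⟩

lemma pv_finish_run (r : List Int) (h : ∃ x ∈ r, x ≠ -1) :
    pvFinish (pvRun r 0 (0, 0, 0)) = pvSeqTunnel r := by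
  rw [pv_run_zero r 0 0 0 h, pvSeqTunnel]
  have hk : r.findIdx (fun v => !(v == -1)) < r.length := by
    rw [List.findIdx_lt_length]
    obtain ⟨x, hx, hne⟩ := h
    exact ⟨x, hx, by simp [hne]⟩
  have hdrop : r.drop (r.findIdx (fun v => !(v == -1)))
      = r[r.findIdx (fun v => !(v == -1))] :: r.drop (r.findIdx (fun v => !(v == -1)) + 1) :=
    List.drop_eq_getElem_cons hk
  have hhead : (r[r.findIdx (fun v => !(v == -1))] == -1) = false := by
    have := List.findIdx_getElem (p := fun v => !(v == -1)) (w := hk)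
    simpa using this
  rw [hdrop, List.findIdx_cons, hhead]
  simp only [cond_false]
  simp only [List.cons.injEq, and_true]
  exact ⟨by ring, by push_cast; ring⟩

-- ===== A-side characterizations (per sequence) =====
lemma pv_mapRange {α : Type} (f : List Int → α) (m : List (List Int)) :
    (List.range m.length).map (fun j => f (m.getD j [])) = m.map f := by
  apply List.ext_getElem (by simp)
  intro i h1 h2
  simp only [List.getElem_map, List.getElem_range]
  rw [List.getD_eq_getElem _ _ (by simpa using h2)]

lemma pv_colGetD : ∀ (m : List (List Int)) (i j : Nat),
    (m.map (fun r => r.getD i 0)).getD j 0 = (m.getD j []).getD i 0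
  | [], _, _ => by simp
  | r :: m, i, 0 => by simp
  | r :: m, i, j+1 => by
      simp only [List.map_cons, List.getD_cons_succ]
      exact pv_colGetD m i j

lemma pv_walls_eq : ∀ (xs : List Int) (s : Int),
    (PySem.List.enumerate xs s).filterMap (fun kv => if kv.2 == 1 then some kv.1 else none)
      = ((List.range xs.length).filter (fun i => xs.getD i 0 == 1)).map (fun i : Nat => s + (i : Int))
  | [], s => by simp [PySem.List.enumerate]
  | x :: xs, s => by
      rw [PySem.List.enumerate_cons, List.filterMap_cons, pv_walls_eq xs (s+1)]
      rw [List.length_cons, List.range_succ_eq_map, List.filter_cons]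
      simp only [List.getD_cons_zero, List.filter_map, Function.comp_def, List.getD_cons_succ]
      have hmap : List.map (fun i : Nat => s + (i:Int))
          (List.map Nat.succ (List.filter (fun i => xs.getD i 0 == 1) (List.range xs.length)))
          = List.map (fun i : Nat => s + 1 + (i:Int))
          (List.filter (fun i => xs.getD i 0 == 1) (List.range xs.length)) := by
        rw [List.map_map]
        apply List.map_congr_left; intro a _
        simp only [Function.comp_apply, Nat.succ_eq_add_one]; push_cast; ring
      by_cases hx : (x == 1) = true
      · simp only [hx, if_true, List.map_cons, Nat.cast_zero, add_zero, hmap]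
      · simp only [hx, if_false, Bool.false_eq_true, hmap]

lemma pvSeqWalls_eq (r : List Int) : pvSeqWalls r = pvAWallsRow r := by
  rw [pvSeqWalls, pv_walls_eq r 0, pvAWallsRow]
  apply List.map_congr_left; intro a _; simp

lemma pv_findStart_eq (r : List Int) : ∀ (fuel j : Nat),
    (r.drop j).findIdx (fun v => !(v == -1)) < (r.drop j).length →
    (r.drop j).findIdx (fun v => !(v == -1)) < fuel →
    pvAFindStartRow r fuel j = j + (r.drop j).findIdx (fun v => !(v == -1))
  | 0, j => by omega
  | fuel+1, j => by
      intro hlt hfuel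
      have hj : j < r.length := by
        by_cases h : j < r.length
        · exact h
        · exfalso; rw [List.drop_eq_nil_of_le (by omega)] at hlt; simp at hlt
      rw [List.drop_eq_getElem_cons hj] at hlt hfuel ⊢
      rw [List.findIdx_cons] at hlt hfuel ⊢
      by_cases hv : r[j] = -1
      · have hb : (!(r[j] == -1)) = false := by simp [hv]
        rw [hb] at hlt hfuel ⊢
        simp only [cond_false] at hlt hfuel ⊢
        show pvAFindStartRow r (fuel+1) j = _
        rw [pvAFindStartRow]
        rw [if_pos (by rw [List.getD_eq_getElem _ _ hj]; exact hv)]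
        rw [pv_findStart_eq r fuel (j+1) (by simp at hlt ⊢; omega) (by omega)]
        omega
      · have hb : (!(r[j] == -1)) = true := by simp [hv]
        rw [hb]
        simp only [cond_true, Nat.add_zero]
        rw [pvAFindStartRow]
        rw [if_neg (by rw [List.getD_eq_getElem _ _ hj]; exact hv)]

lemma pv_findEnd_eq (r : List Int) : ∀ (fuel j : Nat), j ≤ r.length →
    (r.drop j).findIdx (fun v => v == -1) ≤ fuel →
    pvAFindEndRow r fuel j = j + (r.drop j).findIdx (fun v => v == -1)
  | 0, j => by
      intro hj hfuel
      rw [pvAFindEndRow]; omega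
  | fuel+1, j => by
      intro hj hfuel
      by_cases hlt : j < r.length
      · rw [List.drop_eq_getElem_cons hlt] at hfuel ⊢
        rw [List.findIdx_cons] at hfuel ⊢
        by_cases hv : r[j] = -1
        · have hb : (r[j] == -1) = true := by simp [hv]
          rw [hb]; simp only [cond_true, Nat.add_zero]
          rw [pvAFindEndRow]
          rw [if_neg (by rw [List.getD_eq_getElem _ _ hlt]; tauto)]
        · have hb : (r[j] == -1) = false := by simp [hv]
          rw [hb] at hfuel ⊢
          simp only [cond_false] at hfuel ⊢
          rw [pvAFindEndRow]
          rw [if_pos ⟨hlt, by rw [List.getD_eq_getElem _ _ hlt]; exact hv⟩]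
          rw [pv_findEnd_eq r fuel (j+1) (by omega) (by omega)]
          omega
      · rw [List.drop_eq_nil_of_le (by omega)]
        simp only [List.findIdx_nil, Nat.add_zero]
        rw [pvAFindEndRow, if_neg (by tauto)]

lemma pv_tunnel_eq (r : List Int) (h : ∃ x ∈ r, x ≠ -1) : pvARowTunnel r = pvSeqTunnel r := by
  have hfind : r.findIdx (fun v => !(v == -1)) < r.length := by
    rw [List.findIdx_lt_length]
    obtain ⟨x, hx, hne⟩ := h
    exact ⟨x, hx, by simp [hne]⟩
  have hs : pvAFindStartRow r r.length 0 = r.findIdx (fun v => !(v == -1)) := by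
    have := pv_findStart_eq r r.length 0 (by simpa using hfind) (by simpa using hfind)
    simpa using this
  rw [pvARowTunnel, pvSeqTunnel, hs]
  have he := pv_findEnd_eq r r.length (r.findIdx (fun v => !(v == -1)))
    (by omega) (le_trans (List.findIdx_le_length) (by simp))
  rw [he]

lemma pv_findStartCol_eq (m : List (List Int)) (jcol : Nat) : ∀ (fuel i : Nat),
    pvAFindStartCol m jcol fuel i = pvAFindStartRow (m.map (fun r => r.getD jcol 0)) fuel i
  | 0, i => rfl
  | fuel+1, i => by
      rw [pvAFindStartCol, pvAFindStartRow, pv_colGetD]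
      split
      · exact pv_findStartCol_eq m jcol fuel (i+1)
      · rfl

lemma pv_findEndCol_eq (m : List (List Int)) (jcol : Nat) : ∀ (fuel i : Nat),
    pvAFindEndCol m jcol fuel i = pvAFindEndRow (m.map (fun r => r.getD jcol 0)) fuel i
  | 0, i => rfl
  | fuel+1, i => by
      rw [pvAFindEndCol, pvAFindEndRow, pv_colGetD, List.length_map]
      split
      · exact pv_findEndCol_eq m jcol fuel (i+1)
      · rfl

lemma pv_colTunnel_eq (m : List (List Int)) (jcol : Nat) :
    pvAColTunnel m jcol = pvARowTunnel (m.map (fun r => r.getD jcol 0)) := by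
  rw [pvAColTunnel, pvARowTunnel, List.length_map, pv_findStartCol_eq, pv_findEndCol_eq]

lemma pv_colWalls_eq (m : List (List Int)) (i : Nat) :
    pvAColWalls m i = pvAWallsRow (m.map (fun r => r.getD i 0)) := by
  rw [pvAColWalls, pvAWallsRow, List.length_map]
  congr 1
  apply List.filter_congr
  intro j _
  rw [pv_colGetD]

-- ===== assembly =====
lemma pv_main (m : List (List Int)) (hpre : Pre_prepare_map m) :
    prepare_map m = prepare_map_alt m := by
  obtain ⟨hne, hw, hle, hrow, hcol⟩ := hpre
  rw [prepare_map, prepare_map_alt]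
  rw [pv_split_outer]
  -- row walls
  have hrw : (PySem.List.enumerate m 0).foldl
      (fun x irow => (PySem.List.enumerate irow.2 0).foldl (pvCRW irow.1) x)
      (List.replicate m.length []) = (List.range m.length).map (fun j => pvAWallsRow (m.getD j [])) := by
    have hb : (fun (x : List (List Int)) (irow : Int × List Int) =>
        (PySem.List.enumerate irow.2 0).foldl (pvCRW irow.1) x)
        = fun x irow => pvModify x irow.1.toNat (fun l => l ++ pvSeqWalls irow.2) := by
      funext x irow; exact pv_row_rw irow.1 irow.2 x
    rw [hb]
    rw [pv_outer_modify0 (fun row (l : List Int) => l ++ pvSeqWalls row) m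
      (List.replicate m.length []) (by simp)]
    rw [pv_zip_replicate (fun row (l : List Int) => l ++ pvSeqWalls row) m [] ]
    rw [pv_mapRange pvAWallsRow m]
    apply List.map_congr_left
    intro r _
    simp [pvSeqWalls_eq]
  -- row tunnels
  have hrt : ((PySem.List.enumerate m 0).foldl
      (fun x irow => (PySem.List.enumerate irow.2 0).foldl (pvCRS irow.1) x)
      (List.replicate m.length (0, 0, 0))).map pvFinish
      = (List.range m.length).map (fun i => pvARowTunnel (m.getD i [])) := by
    have hb : (fun (x : List (Int × Int × Int)) (irow : Int × List Int) =>
        (PySem.List.enumerate irow.2 0).foldl (pvCRS irow.1) x)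
        = fun x irow => pvModify x irow.1.toNat (fun s => pvRun irow.2 0 s) := by
      funext x irow; exact pv_row_rst irow.1 irow.2 x
    rw [hb]
    rw [pv_outer_modify0 (fun row (s : Int × Int × Int) => pvRun row 0 s) m
      (List.replicate m.length (0, 0, 0)) (by simp)]
    rw [pv_zip_replicate (fun row (s : Int × Int × Int) => pvRun row 0 s) m (0, 0, 0)]
    rw [pv_mapRange pvARowTunnel m, List.map_map]
    apply List.map_congr_left
    intro r hr
    simp only [Function.comp_apply]
    rw [pv_finish_run r (hrow r hr), pv_tunnel_eq r (hrow r hr)]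
  -- column walls
  have hcw : (PySem.List.enumerate m 0).foldl
      (fun x irow => (PySem.List.enumerate irow.2 0).foldl (pvCCW (m.getD 0 []).length irow.1) x)
      (List.replicate (m.getD 0 []).length [])
      = (List.range (m.getD 0 []).length).map (fun i => pvAColWalls m i) := by
    have hb : (fun (x : List (List Int)) (irow : Int × List Int) =>
        (PySem.List.enumerate irow.2 0).foldl (pvCCW (m.getD 0 []).length irow.1) x)
        = fun x irow => (PySem.List.enumerate irow.2 0).foldl
            (fun c jv => if jv.1 < ((m.getD 0 []).length : Int) then
              pvModify c jv.1.toNat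
                (fun l => (fun (i : Int) (l : List Int) (v : Int) => if v = 1 then l ++ [i] else l) irow.1 l jv.2)
              else c) x := by
      funext x irow
      rw [pv_ccw_eq (m.getD 0 []).length irow.1]
    rw [hb]
    rw [pv_outer_col0 (m.getD 0 []).length
      (fun (i : Int) (l : List Int) (v : Int) => if v = 1 then l ++ [i] else l) m
      (List.replicate (m.getD 0 []).length []) [] (by simp) hle]
    apply List.map_congr_left
    intro j hj
    have hjw : j < (m.getD 0 []).length := List.mem_range.mp hj
    rw [List.getD_eq_getElem _ _ (by simpa using hjw), List.getElem_replicate]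
    rw [pv_fold_col (fun (i : Int) (l : List Int) (v : Int) => if v = 1 then l ++ [i] else l) m _ j []]
    rw [pv_walls_fold (m.map (fun r => r.getD j 0)) 0 []]
    rw [List.nil_append, pv_colWalls_eq m j, ← pvSeqWalls_eq, pvSeqWalls]
  -- column tunnels
  have hct : ((PySem.List.enumerate m 0).foldl
      (fun x irow => (PySem.List.enumerate irow.2 0).foldl (pvCCS (m.getD 0 []).length irow.1) x)
      (List.replicate (m.getD 0 []).length (0, 0, 0))).map pvFinish
      = (List.range (m.getD 0 []).length).map (fun j => pvAColTunnel m j) := by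
    have hb : (fun (x : List (Int × Int × Int)) (irow : Int × List Int) =>
        (PySem.List.enumerate irow.2 0).foldl (pvCCS (m.getD 0 []).length irow.1) x)
        = fun x irow => (PySem.List.enumerate irow.2 0).foldl
            (fun c jv => if jv.1 < ((m.getD 0 []).length : Int) then
              pvModify c jv.1.toNat
                (fun s => (fun (i : Int) (s : Int × Int × Int) (v : Int) => pvStep s i v) irow.1 s jv.2)
              else c) x := by
      funext x irow
      rw [pv_ccs_eq (m.getD 0 []).length irow.1]
    rw [hb]
    rw [pv_outer_col0 (m.getD 0 []).length
      (fun (i : Int) (s : Int × Int × Int) (v : Int) => pvStep s i v) m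
      (List.replicate (m.getD 0 []).length (0, 0, 0)) (0, 0, 0) (by simp) hle]
    rw [List.map_map]
    apply List.map_congr_left
    intro j hj
    have hjw : j < (m.getD 0 []).length := List.mem_range.mp hj
    simp only [Function.comp_apply]
    rw [List.getD_eq_getElem _ _ (by simpa using hjw), List.getElem_replicate]
    rw [pv_fold_col (fun (i : Int) (s : Int × Int × Int) (v : Int) => pvStep s i v) m _ j (0, 0, 0)]
    have hcolex : ∃ x ∈ m.map (fun r => r.getD j 0), x ≠ -1 := by
      obtain ⟨r, hrm, hv⟩ := hcol j hjw
      exact ⟨r.getD j 0, List.mem_map_of_mem hrm, hv⟩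
    have hrun : (PySem.List.enumerate (m.map (fun r => r.getD j 0)) 0).foldl
        (fun s iv => pvStep s iv.1 iv.2) (0, 0, 0) = pvRun (m.map (fun r => r.getD j 0)) 0 (0, 0, 0) := by
      rfl
    rw [hrun, pv_finish_run _ hcolex, pv_colTunnel_eq m j, pv_tunnel_eq _ hcolex]
  rw [hrw, hrt, hcw, hct]

-- ===== VERDICT (by name: the statement is the Claim_ definition above) =====
theorem prepare_map_spec : Claim_equal_prepare_map := by
  intro m _ hpre
  exact pv_main m hpre
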